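-- pv_equiv track=rewrite | github.com/jijisusu3/algorithm_study_2 | 최병욱/0315_최병욱/신규아이디추천.py | solution
-- ===== SOURCE A (Python) =====
-- def solution(new_id):
--     answer = ''
--     new_id = new_id.lower()
--     N = len(new_id)
--     except_char = '~!@#$%^&*()=+[{]}:?,<>/'
--     except_lst = []
--     for i in range(N):
--         if new_id[i] in except_char:
--             except_lst.append(i)
--     copy_id = ''
--     for i in range(N):
--         if i in except_lst: continue
--         copy_id += new_id[i]
--     N = len(copy_id)
--     copy_id = list(copy_id)
--     i = 0
--     ans = []
--     while i < N:
--         if copy_id[i] != '.':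
--             ans.append(copy_id[i])
--             i += 1
--         else:
--             cnt = 0
--             while i + cnt < N and copy_id[i + cnt] == '.':
--                 cnt += 1
--             i += cnt
--             ans.append('.')
--     if ans[0] == '.':
--         ans.pop(0)
--     if len(ans) > 0:
--         if ans[-1] == '.':
--             ans.pop()
--     if len(ans) == 0:
--         ans += ['a']
--     if len(ans) >= 16:
--         while len(ans) > 15:
--             ans.pop()
--         if ans[-1] == '.':
--             ans.pop()
--     if len(ans) <= 2:
--         while len(ans) < 3:
--             ans += ans[-1]
--     for a in ans:
--         answer += a
--     return answer
-- ===== SOURCE B (Python) =====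
-- def solution(new_id):
--     # one left-to-right pass: lowercase, drop disallowed chars, collapse dot runs
--     # and skip leading dots, all via the state "last appended char"; then tail fixups
--     bad = set('~!@#$%^&*()=+[{]}:?,<>/')
--     buf = []
--     for ch in new_id:
--         c = ch.lower()
--         if c in bad:
--             continue
--         if c == '.' and (not buf or buf[-1] == '.'):
--             continue
--         buf.append(c)
--     if buf and buf[-1] == '.':
--         buf.pop()
--     if not buf:
--         buf = ['a']
--     if len(buf) > 15:
--         del buf[15:]
--         if buf[-1] == '.':
--             buf.pop()
--     if len(buf) < 3:
--         buf.extend(buf[-1] * (3 - len(buf)))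
--     return ''.join(buf)
-- ===== Notes on version B (the rewrite author's own statement) =====
-- stated objective: faster
-- what changed: A makes five staged passes (build an index blacklist with an O(n) membership scan per char, rebuild the string, collapse dots with an index/while loop, then pop loops); B is ONE left-to-right pass whose accumulator state (last appended char) does the filtering, dot-run collapsing and leading-dot skipping simultaneously, followed by constant-size tail fixups.
import Mathlib
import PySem

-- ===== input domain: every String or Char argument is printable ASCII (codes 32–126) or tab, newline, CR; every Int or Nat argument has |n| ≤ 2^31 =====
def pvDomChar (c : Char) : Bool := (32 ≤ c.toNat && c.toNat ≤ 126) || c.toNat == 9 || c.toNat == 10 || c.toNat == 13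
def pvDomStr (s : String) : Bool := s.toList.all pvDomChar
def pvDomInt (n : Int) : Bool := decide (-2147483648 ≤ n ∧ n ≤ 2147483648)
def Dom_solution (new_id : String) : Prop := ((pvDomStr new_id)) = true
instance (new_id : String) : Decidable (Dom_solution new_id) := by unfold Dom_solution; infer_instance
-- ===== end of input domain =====

-- B replaces A's five staged passes (index blacklist, copy loop, dot-run while loops, pop loops)
-- by ONE left-to-right pass whose accumulator state (last appended char) does the filtering,
-- dot-collapsing and leading-dot skipping at once; equivalence is about the return value only.

-- ===== PORT A =====
def pvExceptChars : List Char :=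
  ['~','!','@','#','$','%','^','&','*','(',')','=','+','[','{',']','}',':','?',',','<','>','/']

-- inner `while i + cnt < N and copy_id[i + cnt] == '.': cnt += 1` (fuel only makes it total; N fuel always suffices)
def pvDotCnt (fuel : Nat) (copy : List Char) (N i cnt : Nat) : Nat :=
  match fuel with
  | 0 => cnt
  | fuel' + 1 =>
    if i + cnt < N ∧ copy.getD (i + cnt) ' ' = '.' then pvDotCnt fuel' copy N i (cnt + 1)
    else cnt

-- the outer `while i < N` loop building `ans` (fuel only makes it total; N fuel always suffices since i grows each pass)
def pvLoopA (fuel : Nat) (copy : List Char) (N i : Nat) (ans : List Char) : List Char :=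
  match fuel with
  | 0 => ans
  | fuel' + 1 =>
    if i < N then
      (if copy.getD i ' ' ≠ '.' then
        pvLoopA fuel' copy N (i + 1) (ans ++ [copy.getD i ' '])
      else
        pvLoopA fuel' copy N (i + pvDotCnt N copy N i 0) (ans ++ ['.']))
    else ans

-- `while len(ans) > 15: ans.pop()` (fuel only makes it total; len(ans) fuel suffices)
def pvPopTo15 (fuel : Nat) (l : List Char) : List Char :=
  match fuel with
  | 0 => l
  | fuel' + 1 => if 15 < l.length then pvPopTo15 fuel' l.dropLast else l

-- `while len(ans) < 3: ans += ans[-1]` (fuel only makes it total; 3 fuel suffices)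
def pvPad3 (fuel : Nat) (l : List Char) : List Char :=
  match fuel with
  | 0 => l
  | fuel' + 1 => if l.length < 3 then pvPad3 fuel' (l ++ [l.getLastD ' ']) else l

def solution (new_id : String) : String :=
  let s := PySem.Chars.lower new_id.toList
  let N := PySem.List.len s
  let exceptLst : List Int :=
    (PySem.List.pyRange 0 N).foldl
      (fun acc i => if pvExceptChars.contains (PySem.List.pyGetD s i ' ') then acc ++ [i] else acc) []
  let copyId : List Char :=
    (PySem.List.pyRange 0 N).foldl
      (fun acc i => if exceptLst.contains i then acc else acc ++ [PySem.List.pyGetD s i ' ']) []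
  let ans0 := pvLoopA copyId.length copyId copyId.length 0 []
  -- `if ans[0] == '.': ans.pop(0)` — ans[0] raises IndexError on empty ans (excluded by Pre_); headD is exact on nonempty ans
  let ans1 := if ans0.headD ' ' = '.' then ans0.drop 1 else ans0
  let ans2 := if 0 < ans1.length then
      (if ans1.getLastD ' ' = '.' then ans1.dropLast else ans1) else ans1
  let ans3 := if ans2.length = 0 then ans2 ++ ['a'] else ans2
  let ans4 := if 16 ≤ ans3.length then
      (let t := pvPopTo15 ans3.length ans3
       if t.getLastD ' ' = '.' then t.dropLast else t)
    else ans3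
  let ans5 := if ans4.length ≤ 2 then pvPad3 3 ans4 else ans4
  String.mk (ans5.foldl (fun acc a => acc ++ [a]) [])

-- ===== PORT B =====
-- B's loop body: lowercase the char, skip it if disallowed, skip a dot when the
-- buffer is empty (leading dot) or already ends in a dot (run collapse), else append.
-- `not buf or buf[-1] == '.'` is ported with the disjuncts in Python's short-circuit order.
def pvBStep (buf : List Char) (ch : Char) : List Char :=
  let c := PySem.Chars.lowerChar ch
  if pvExceptChars.contains c then buf
  else if c = '.' ∧ (buf = [] ∨ PySem.List.pyGetD buf (-1) ' ' = '.') then buf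
  else buf ++ [c]

def solution_alt (new_id : String) : String :=
  let buf0 := new_id.toList.foldl pvBStep []
  -- `if buf and buf[-1] == '.': buf.pop()`
  let buf1 := if buf0 ≠ [] ∧ PySem.List.pyGetD buf0 (-1) ' ' = '.' then buf0.dropLast else buf0
  let buf2 := if buf1 = [] then ['a'] else buf1
  -- `del buf[15:]` then a guarded pop of a trailing dot
  let buf3 := if 15 < buf2.length then
      (let t := buf2.take 15
       if PySem.List.pyGetD t (-1) ' ' = '.' then t.dropLast else t)
    else buf2
  -- `buf.extend(buf[-1] * (3 - len(buf)))`
  let buf4 := if buf3.length < 3 then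
      buf3 ++ List.replicate (3 - buf3.length) (PySem.List.pyGetD buf3 (-1) ' ') else buf3
  -- ''.join(buf) on a list of single chars is exactly the string of those chars
  String.mk buf4

-- ===== PRECONDITION & SPEC =====
-- Pre_ excludes exactly the inputs on which A raises IndexError at `ans[0]`: strings whose
-- characters (the empty string included) all lie in the disallowed set, so nothing survives the filter.
def Pre_solution (new_id : String) : Prop :=
  new_id.toList.any (fun c => !(pvExceptChars.contains c)) = true
instance (new_id : String) : Decidable (Pre_solution new_id) := by unfold Pre_solution; infer_instance

def pvWitness_solution : String := "..New-ID..kim"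

def Spec_solution (new_id : String) (out : String) : Prop := out = solution_alt new_id
instance (new_id : String) (out : String) : Decidable (Spec_solution new_id out) := by unfold Spec_solution; infer_instance

-- ===== CLAIM (what is proved, stated in full; the proofs are below) =====
def Claim_equal_solution : Prop := ∀ (new_id : String), Dom_solution new_id → Pre_solution new_id → Spec_solution new_id (solution new_id)

-- ===== LEMMAS AND PROOFS =====

-- SPEC of A's dot-collapsing while loop: each maximal run of dots becomes one dot
-- (the Bool flag records whether we are inside a run of dots)
def pvCollapseF (inDots : Bool) : List Char → List Char
  | [] => []
  | c :: rest =>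
    if c = '.' then (if inDots then [] else ['.']) ++ pvCollapseF true rest
    else c :: pvCollapseF false rest

def pvCollapse (l : List Char) : List Char := pvCollapseF false l

lemma pvCollapseT_eq (l : List Char) :
    pvCollapseF true l = pvCollapse (l.dropWhile (fun x => x == '.')) := by
  induction l with
  | nil => rfl
  | cons a t ih =>
    by_cases ha : a = '.'
    · simpa [pvCollapseF, ha] using ih
    · simp [pvCollapse, pvCollapseF, ha]

lemma pvCollapse_cons (a : Char) (t : List Char) :
    pvCollapse (a :: t) =
      if a = '.' then '.' :: pvCollapse (t.dropWhile (fun x => x == '.'))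
      else a :: pvCollapse t := by
  by_cases ha : a = '.'
  · simp [pvCollapse, pvCollapseF, ha, pvCollapseT_eq]
  · simp [pvCollapse, pvCollapseF, ha]

lemma pvGetNeg1 {l : List Char} (hne : l ≠ []) :
    PySem.List.pyGetD l (-1) ' ' = l.getLastD ' ' := by
  simp [pysem, hne, List.getLastD_eq_getLast?, List.getLast?_eq_getLast_of_ne_nil hne]

-- ----- A side: the staged loops compute filter + collapse -----

lemma pvDotCnt_eq (copy : List Char) (i cnt : Nat) (fuel : Nat)
    (hf : copy.length - (i + cnt) ≤ fuel) :
    pvDotCnt fuel copy copy.length i cnt =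
      cnt + ((copy.drop (i + cnt)).takeWhile (fun x => x == '.')).length := by
  induction fuel generalizing i cnt with
  | zero =>
    have : copy.drop (i + cnt) = [] := List.drop_eq_nil_of_le (by omega)
    simp [pvDotCnt, this]
  | succ fuel' ih =>
    by_cases h : i + cnt < copy.length ∧ copy.getD (i + cnt) ' ' = '.'
    · rw [pvDotCnt, if_pos h]
      rw [ih i (cnt + 1) (by omega)]
      have hdrop : copy.drop (i + cnt) = copy[i + cnt] :: copy.drop (i + cnt + 1) :=
        List.drop_eq_getElem_cons h.1
      have hget : copy[i + cnt] = '.' := by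
        have := h.2; rwa [List.getD_eq_getElem _ _ h.1] at this
      rw [show i + (cnt + 1) = i + cnt + 1 by omega]
      rw [hdrop, hget, List.takeWhile_cons, if_pos (by simp)]
      simp; omega
    · rw [pvDotCnt, if_neg h]
      rcases Nat.lt_or_ge (i + cnt) copy.length with hlt | hge
      · have hget : copy[i + cnt] ≠ '.' := by
          intro hc
          exact h ⟨hlt, by rw [List.getD_eq_getElem _ _ hlt]; exact hc⟩
        have hdrop : copy.drop (i + cnt) = copy[i + cnt] :: copy.drop (i + cnt + 1) :=
          List.drop_eq_getElem_cons hlt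
        rw [hdrop, List.takeWhile_cons, if_neg (by simpa using hget)]
        simp
      · have : copy.drop (i + cnt) = [] := List.drop_eq_nil_of_le hge
        simp [this]

lemma pvDropWhile_eq_drop (p : Char → Bool) (l : List Char) :
    l.dropWhile p = l.drop (l.takeWhile p).length := by
  induction l with
  | nil => simp
  | cons a t ih =>
    by_cases ha : p a
    · simp [List.takeWhile_cons, ha, ih]
    · simp [List.takeWhile_cons, ha]

lemma pvLoopA_eq (copy : List Char) (fuel i : Nat) (ans : List Char)
    (hf : copy.length - i ≤ fuel) :
    pvLoopA fuel copy copy.length i ans = ans ++ pvCollapse (copy.drop i) := by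
  induction fuel generalizing i ans with
  | zero =>
    have : copy.drop i = [] := List.drop_eq_nil_of_le (by omega)
    simp [pvLoopA, this, pvCollapse, pvCollapseF]
  | succ fuel' ih =>
    by_cases hi : i < copy.length
    · have hdrop : copy.drop i = copy[i] :: copy.drop (i + 1) := List.drop_eq_getElem_cons hi
      by_cases hc : copy.getD i ' ' ≠ '.'
      · rw [pvLoopA, if_pos hi, if_pos hc, ih (i + 1) _ (by omega)]
        have hget : copy.getD i ' ' = copy[i] := List.getD_eq_getElem _ _ hi
        rw [hdrop, pvCollapse_cons, if_neg (by rw [← hget]; exact hc), hget]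
        simp
      · push_neg at hc
        have hget : copy[i] = '.' := by rwa [List.getD_eq_getElem _ _ hi] at hc
        rw [pvLoopA, if_pos hi, if_neg (not_not_intro hc)]
        have hcnt : pvDotCnt copy.length copy copy.length i 0 =
            ((copy.drop i).takeWhile (fun x => x == '.')).length := by
          simpa using pvDotCnt_eq copy i 0 copy.length (by omega)
        have htw : (copy.drop i).takeWhile (fun x => x == '.') =
            '.' :: (copy.drop (i + 1)).takeWhile (fun x => x == '.') := by
          rw [hdrop, hget, List.takeWhile_cons, if_pos (by simp)]
        have hcnt1 : 1 ≤ pvDotCnt copy.length copy copy.length i 0 := by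
          rw [hcnt, htw]; simp
        rw [ih _ _ (by omega)]
        have hdd : copy.drop (i + pvDotCnt copy.length copy copy.length i 0) =
            (copy.drop (i + 1)).dropWhile (fun x => x == '.') := by
          rw [pvDropWhile_eq_drop, List.drop_drop, hcnt, htw]
          congr 1
          simp; omega
        rw [hdd, hdrop, pvCollapse_cons, if_pos hget]
        simp
    · rw [pvLoopA, if_neg hi]
      have : copy.drop i = [] := List.drop_eq_nil_of_le (by omega)
      simp [this, pvCollapse, pvCollapseF]

lemma pvPopTo15_eq (l : List Char) (fuel : Nat) (hf : l.length - 15 ≤ fuel) :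
    pvPopTo15 fuel l = l.take 15 := by
  induction fuel generalizing l with
  | zero => rw [pvPopTo15, List.take_of_length_le (by omega)]
  | succ fuel' ih =>
    by_cases h : 15 < l.length
    · rw [pvPopTo15, if_pos h, ih _ (by simp [List.length_dropLast]; omega)]
      rw [List.dropLast_eq_take, List.take_take]
      congr 1; omega
    · rw [pvPopTo15, if_neg h, List.take_of_length_le (by omega)]

lemma pvPad3_eq {l : List Char} (hne : l ≠ []) (hlen : l.length ≤ 2) :
    pvPad3 3 l = l ++ List.replicate (3 - l.length) (l.getLastD ' ') := by
  match l, hne, hlen with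
  | [a], _, _ => simp [pvPad3]
  | [a, b], _, _ => simp [pvPad3]

lemma pvCopy_eq (s : List Char) :
    (PySem.List.pyRange 0 (PySem.List.len s)).foldl
      (fun acc i => if ((PySem.List.pyRange 0 (PySem.List.len s)).foldl
          (fun acc2 j => if pvExceptChars.contains (PySem.List.pyGetD s j ' ') then acc2 ++ [j] else acc2) []).contains i
        then acc else acc ++ [PySem.List.pyGetD s i ' ']) []
    = s.filter (fun c => !(pvExceptChars.contains c)) := by
  have hE : ((PySem.List.pyRange 0 (PySem.List.len s)).foldl
      (fun acc2 j => if pvExceptChars.contains (PySem.List.pyGetD s j ' ') then acc2 ++ [j] else acc2) [])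
      = (PySem.List.pyRange 0 (PySem.List.len s)).filter
          (fun j => pvExceptChars.contains (PySem.List.pyGetD s j ' ')) := by
    rw [PySem.List.foldl_append_if (f := fun j => j)]
    simp
  rw [hE]
  have hstep : ∀ (acc : List Char) (i : Int), i ∈ PySem.List.pyRange 0 (PySem.List.len s) →
      (if ((PySem.List.pyRange 0 (PySem.List.len s)).filter
          (fun j => pvExceptChars.contains (PySem.List.pyGetD s j ' '))).contains i
        then acc else acc ++ [PySem.List.pyGetD s i ' ']) =
      (if !(pvExceptChars.contains (PySem.List.pyGetD s i ' ')) then acc ++ [PySem.List.pyGetD s i ' '] else acc) := by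
    intro acc i hi
    have hib : i ∈ PySem.List.pyRange 0 (PySem.List.len s) := hi
    have hmem : (((PySem.List.pyRange 0 (PySem.List.len s)).filter
          (fun j => pvExceptChars.contains (PySem.List.pyGetD s j ' '))).contains i)
        = pvExceptChars.contains (PySem.List.pyGetD s i ' ') := by
      by_cases hc : pvExceptChars.contains (PySem.List.pyGetD s i ' ') = true
      · simp only [hc]
        simp only [List.contains_eq_any_beq] at *
        simp [List.mem_filter, hc]
        refine ⟨by simpa [PySem.List.mem_pyRange_one] using hib, ?_⟩
        simpa [List.contains_eq_any_beq] using hc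
      · simp [List.mem_filter, hc]
        intro h
        exact absurd h (by simpa using hc)
    rw [hmem]
    cases hb : pvExceptChars.contains (PySem.List.pyGetD s i ' ') <;> simp
  rw [PySem.List.foldl_congr_mem _ _ _ _ hstep]
  rw [PySem.List.foldl_append_if (p := fun i => !(pvExceptChars.contains (PySem.List.pyGetD s i ' ')))
      (f := fun i => PySem.List.pyGetD s i ' ')]
  rw [show (fun i : Int => !(pvExceptChars.contains (PySem.List.pyGetD s i ' ')))
      = ((fun c => !(pvExceptChars.contains c)) ∘ (fun i : Int => PySem.List.pyGetD s i ' ')) from rfl]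
  rw [← List.filter_map, PySem.List.map_pyGetD_pyRange_zero]
  simp

-- A's leading-dot pop on the collapsed list = collapsing the dot-stripped list
lemma pvHeadPop_eq (F : List Char) :
    (if (pvCollapse F).headD ' ' = '.' then (pvCollapse F).drop 1 else pvCollapse F)
      = pvCollapse (F.dropWhile (fun x => x == '.')) := by
  cases F with
  | nil => simp [pvCollapse, pvCollapseF]
  | cons c t =>
    by_cases hc : c = '.'
    · subst hc
      rw [pvCollapse_cons, if_pos rfl]
      simp [List.dropWhile_cons]
    · have h1 : pvCollapse (c :: t) = c :: pvCollapse t := by rw [pvCollapse_cons, if_neg hc]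
      rw [h1, if_neg (by simp [hc]), List.dropWhile_cons, if_neg (by simpa using hc), h1]

-- ----- B side: the single pass computes the same filter + collapse + leading strip -----

-- B's step on an already-lowered char
def pvBCore (buf : List Char) (c : Char) : List Char :=
  if pvExceptChars.contains c then buf
  else if c = '.' ∧ (buf = [] ∨ PySem.List.pyGetD buf (-1) ' ' = '.') then buf
  else buf ++ [c]

-- B's step on an already-lowered, already-filtered char
def pvBDot (buf : List Char) (c : Char) : List Char :=
  if c = '.' ∧ (buf = [] ∨ PySem.List.pyGetD buf (-1) ' ' = '.') then buf
  else buf ++ [c]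

lemma pvFoldCore_eq (l : List Char) (buf : List Char) :
    l.foldl pvBCore buf = (l.filter (fun c => !(pvExceptChars.contains c))).foldl pvBDot buf := by
  have : pvBCore = fun (b : List Char) (c : Char) =>
      if (!(pvExceptChars.contains c)) = true then pvBDot b c else b := by
    funext b c
    by_cases hc : pvExceptChars.contains c = true <;> simp [pvBCore, pvBDot, hc]
  rw [this, PySem.List.foldl_if_eq_foldl_filter]

lemma pvFoldDot_ne (G : List Char) : ∀ (buf : List Char), buf ≠ [] →
    G.foldl pvBDot buf = buf ++ pvCollapseF (buf.getLastD ' ' == '.') G := by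
  induction G with
  | nil => intro buf _; simp [pvCollapseF]
  | cons c G' ih =>
    intro buf hbuf
    by_cases hc : c = '.'
    · by_cases hl : buf.getLastD ' ' = '.'
      · have : pvBDot buf c = buf := by
          rw [pvBDot, if_pos ⟨hc, Or.inr (by rw [pvGetNeg1 hbuf]; exact hl)⟩]
        rw [List.foldl_cons, this, ih buf hbuf]
        have hl' : buf.getLast?.getD ' ' = '.' := by rwa [List.getLastD_eq_getLast?] at hl
        simp [pvCollapseF, hc, hl']
      · have : pvBDot buf c = buf ++ [c] := by
          rw [pvBDot, if_neg]
          rintro ⟨_, h2⟩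
          rcases h2 with h2 | h2
          · exact hbuf h2
          · rw [pvGetNeg1 hbuf] at h2; exact hl h2
        rw [List.foldl_cons, this, ih (buf ++ [c]) (by simp)]
        have hl' : ¬ buf.getLast?.getD ' ' = '.' := by rwa [List.getLastD_eq_getLast?] at hl
        simp [pvCollapseF, hc, hl']
    · have : pvBDot buf c = buf ++ [c] := by
        rw [pvBDot, if_neg]; rintro ⟨h1, _⟩; exact hc h1
      rw [List.foldl_cons, this, ih (buf ++ [c]) (by simp)]
      have hcb : (c == '.') = false := by simp [hc]
      by_cases hl : buf.getLast?.getD ' ' = '.' <;> simp [pvCollapseF, hc, hl, hcb]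

lemma pvFoldDot_nil (G : List Char) :
    G.foldl pvBDot [] = pvCollapse (G.dropWhile (fun x => x == '.')) := by
  induction G with
  | nil => rfl
  | cons c G' ih =>
    by_cases hc : c = '.'
    · have : pvBDot [] c = [] := by rw [pvBDot, if_pos ⟨hc, Or.inl rfl⟩]
      rw [List.foldl_cons, this, ih]
      simp [List.dropWhile_cons, hc]
    · have hstep : pvBDot [] c = [c] := by
        rw [pvBDot, if_neg (by rintro ⟨h1, _⟩; exact hc h1)]
        rfl
      have hcb : (c == '.') = false := by simp [hc]
      rw [List.foldl_cons, hstep, pvFoldDot_ne G' [c] (by simp)]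
      rw [List.dropWhile_cons, if_neg (by simpa using hc), pvCollapse_cons, if_neg hc]
      simp [pvCollapse, hcb]

-- ----- the common tail: A's ans1… equals B's buf0… given the same list -----

lemma pvTail_eq (L : List Char) :
    (let ans2 := if 0 < L.length then
         (if L.getLastD ' ' = '.' then L.dropLast else L) else L
     let ans3 := if ans2.length = 0 then ans2 ++ ['a'] else ans2
     let ans4 := if 16 ≤ ans3.length then
         (let t := pvPopTo15 ans3.length ans3
          if t.getLastD ' ' = '.' then t.dropLast else t)
       else ans3
     let ans5 := if ans4.length ≤ 2 then pvPad3 3 ans4 else ans4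
     ans5.foldl (fun acc a => acc ++ [a]) [])
    = (let buf1 := if L ≠ [] ∧ PySem.List.pyGetD L (-1) ' ' = '.' then L.dropLast else L
       let buf2 := if buf1 = [] then ['a'] else buf1
       let buf3 := if 15 < buf2.length then
           (let t := buf2.take 15
            if PySem.List.pyGetD t (-1) ' ' = '.' then t.dropLast else t)
         else buf2
       let buf4 := if buf3.length < 3 then
           buf3 ++ List.replicate (3 - buf3.length) (PySem.List.pyGetD buf3 (-1) ' ') else buf3
       buf4) := by
  dsimp only
  have h12 : (if 0 < L.length then (if L.getLastD ' ' = '.' then L.dropLast else L) else L)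
      = (if L ≠ [] ∧ PySem.List.pyGetD L (-1) ' ' = '.' then L.dropLast else L) := by
    cases hL : L with
    | nil => simp
    | cons a t =>
      rw [if_pos (by simp)]
      by_cases hl : (a :: t).getLastD ' ' = '.'
      · rw [if_pos hl, if_pos ⟨by simp, by rw [pvGetNeg1 (by simp)]; exact hl⟩]
      · rw [if_neg hl, if_neg]
        rintro ⟨hne, h2⟩
        rw [pvGetNeg1 hne] at h2; exact hl h2
  rw [h12]
  set a2 := if L ≠ [] ∧ PySem.List.pyGetD L (-1) ' ' = '.' then L.dropLast else L with ha2
  have h23 : (if a2.length = 0 then a2 ++ ['a'] else a2) = (if a2 = [] then ['a'] else a2) := by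
    by_cases h : a2 = [] <;> simp [h]
  rw [h23]
  set e3 := if a2 = [] then ['a'] else a2 with he3
  have hne3 : e3 ≠ [] := by
    rw [he3]; by_cases h : a2 = [] <;> simp [h]
  have h34 : (if 16 ≤ e3.length then
        (let t := pvPopTo15 e3.length e3
         if t.getLastD ' ' = '.' then t.dropLast else t)
      else e3)
      = (if 15 < e3.length then
          (let t := e3.take 15
           if PySem.List.pyGetD t (-1) ' ' = '.' then t.dropLast else t)
        else e3) := by
    by_cases h16 : 16 ≤ e3.length
    · have h15 : 15 < e3.length := by omega
      rw [if_pos h16, if_pos h15]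
      have hpop : pvPopTo15 e3.length e3 = e3.take 15 := pvPopTo15_eq e3 e3.length (by omega)
      have htne : e3.take 15 ≠ [] := by
        simp [List.take_eq_nil_iff, hne3]
      simp only [hpop, pvGetNeg1 htne]
    · have h15 : ¬ 15 < e3.length := by omega
      rw [if_neg h16, if_neg h15]
  rw [h34]
  set e4 := if 15 < e3.length then
      (let t := e3.take 15
       if PySem.List.pyGetD t (-1) ' ' = '.' then t.dropLast else t)
    else e3 with he4
  have hne4 : e4 ≠ [] := by
    rw [he4]
    by_cases h15 : 15 < e3.length
    · rw [if_pos h15]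
      have htlen : (e3.take 15).length = 15 := by rw [List.length_take]; omega
      by_cases hd : PySem.List.pyGetD (e3.take 15) (-1) ' ' = '.'
      · simp only [hd, if_pos]
        intro hc
        have := congrArg List.length hc
        simp [List.length_dropLast, htlen] at this
      · simp only [hd, ite_false]
        intro hc
        have := congrArg List.length hc
        simp [htlen] at this
    · rw [if_neg h15]; exact hne3
  have h45 : (if e4.length ≤ 2 then pvPad3 3 e4 else e4)
      = (if e4.length < 3 then
          e4 ++ List.replicate (3 - e4.length) (PySem.List.pyGetD e4 (-1) ' ') else e4) := by
    by_cases h2 : e4.length ≤ 2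
    · have h3 : e4.length < 3 := by omega
      rw [if_pos h2, if_pos h3, pvPad3_eq hne4 h2, pvGetNeg1 hne4]
    · have h3 : ¬ e4.length < 3 := by omega
      rw [if_neg h2, if_neg h3]
  rw [h45, PySem.List.foldl_append_singleton_eq_self]
  rfl

-- ===== VERDICT (by name: the statement is the Claim_ definition above) =====
set_option maxHeartbeats 1000000 in
theorem solution_spec : Claim_equal_solution := by
  intro new_id _ _
  rw [Spec_solution]
  simp only [solution, solution_alt]
  rw [pvCopy_eq]
  rw [pvLoopA_eq _ _ 0 [] (by omega), List.drop_zero, List.nil_append]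
  rw [pvHeadPop_eq]
  have hB : new_id.toList.foldl pvBStep [] =
      pvCollapse (((PySem.Chars.lower new_id.toList).filter
        (fun c => !(pvExceptChars.contains c))).dropWhile (fun x => x == '.')) := by
    have h1 : new_id.toList.foldl pvBStep [] =
        (new_id.toList.map PySem.Chars.lowerChar).foldl pvBCore [] := by
      rw [List.foldl_map]
      rfl
    rw [h1, pvFoldCore_eq, pvFoldDot_nil]
    rfl
  rw [← hB]
  exact congrArg String.mk (pvTail_eq (new_id.toList.foldl pvBStep []))
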